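-- pv_equiv track=rewrite | github.com/jojonki/key-value-memory-networks | process_data.py | find_ngrams
-- ===== SOURCE A (Python) =====
-- def find_ngrams(token_dict, text, n):
--     """ See: https://github.com/facebookresearch/ParlAI/blob/master/parlai/core/dict.py#L31
--         token_dict:  {'hello world', 'ol boy'}
--         text: ['hello', 'world', 'buddy', 'ol', 'boy']
--         n: max n of n-gram
--         ret: ['hello world', 'buddy', 'ol boy']
--     """
--     """Breaks text into ngrams that appear in ``token_dict``."""
--     # base case
--     if n <= 1:
--         return text
--     # tokens committed to output
--     saved_tokens = []
--     # tokens remaining to be searched in sentence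
--     search_tokens = text[:]
--     # tokens stored until next ngram found
--     next_search = []
--     while len(search_tokens) >= n:
--         ngram = ' '.join(search_tokens[:n])
--         if ngram in token_dict:
--             # first, search previous unmatched words for smaller ngrams
--             sub_n = min(len(next_search), n - 1)
--             saved_tokens.extend(find_ngrams(token_dict, next_search, sub_n))
--             next_search.clear()
--             # then add this ngram
--             saved_tokens.append(ngram)
--             # then pop this ngram from the remaining words to search
--             search_tokens = search_tokens[n:]
--         else:
--             next_search.append(search_tokens.pop(0))
--     remainder = next_search + search_tokens
--     sub_n = min(len(remainder), n - 1)
--     saved_tokens.extend(find_ngrams(token_dict, remainder, sub_n))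
--     return saved_tokens
-- ===== SOURCE B (Python) =====
-- def find_ngrams(token_dict, text, n):
--     """Breaks text into ngrams that appear in ``token_dict``.
--
--     Non-recursive level-by-level rewrite: keep one work list of items
--     (a token, or an already-committed ngram acting as a barrier); for
--     k = min(n, len(text)) down to 2 do one greedy left-to-right pass that
--     commits runs of k uncommitted tokens whose join is in token_dict.
--     """
--     if n <= 1:
--         return text
--     grams = set(token_dict)
--     toks = list(text)                  # item strings
--     committed = [False] * len(toks)    # True = committed ngram (barrier)
--     for k in range(min(n, len(toks)), 1, -1):
--         new_t, new_c = [], []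
--         i = 0
--         L = len(toks)
--         while i < L:
--             if i + k <= L and not any(committed[i:i + k]):
--                 gram = ' '.join(toks[i:i + k])
--                 if gram in grams:
--                     new_t.append(gram)
--                     new_c.append(True)
--                     i += k
--                     continue
--             new_t.append(toks[i])
--             new_c.append(committed[i])
--             i += 1
--         toks, committed = new_t, new_c
--     return toks
-- ===== Notes on version B (the rewrite author's own statement) =====
-- stated objective: alternative
-- what changed: A's per-segment recursion (descend to n-1 on each unmatched stretch, with pop(0)/slice bookkeeping) is replaced by a non-recursive work list of items in which committed ngrams act as barriers: one greedy left-to-right pass per window size k = min(n, len(text)) down to 2, with token_dict read through a set built once for O(1) membership.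
import Mathlib
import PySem

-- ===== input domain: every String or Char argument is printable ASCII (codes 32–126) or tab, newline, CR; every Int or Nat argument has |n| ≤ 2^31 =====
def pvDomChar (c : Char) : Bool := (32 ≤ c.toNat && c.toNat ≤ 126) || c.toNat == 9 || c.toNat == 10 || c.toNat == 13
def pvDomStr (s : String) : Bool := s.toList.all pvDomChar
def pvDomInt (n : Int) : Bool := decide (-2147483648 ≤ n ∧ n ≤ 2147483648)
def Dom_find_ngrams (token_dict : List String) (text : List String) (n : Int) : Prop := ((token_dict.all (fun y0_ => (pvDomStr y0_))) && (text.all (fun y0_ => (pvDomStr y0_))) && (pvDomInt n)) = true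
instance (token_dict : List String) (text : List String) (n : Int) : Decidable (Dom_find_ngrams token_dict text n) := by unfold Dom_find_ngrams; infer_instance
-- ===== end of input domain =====

-- B replaces A's per-segment recursion by a single item list rewritten level by
-- level (k = n..2), committed ngrams acting as barriers (objective: alternative
-- decomposition, no recursion on segments). Neither program mutates its inputs.

-- ===== PORT A =====
-- ' '.join(ss)
def pvJoin (ss : List String) : String := PySem.Str.join " " ss

-- A's while-loop carries n as k+2 (the loop body only ever runs with n ≥ 2,
-- established by the `n ≤ 1` test in find_ngrams); state (saved, search, next).
mutual
def find_ngrams (token_dict : List String) (text : List String) (n : Int) : List String :=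
  if n ≤ 1 then text
  else pvLoopA token_dict (n.toNat - 2) [] text []
termination_by (n.toNat, text.length + 1)
decreasing_by
  apply Prod.Lex.right' <;> omega

def pvLoopA (token_dict : List String) (k : Nat) (saved search next : List String) : List String :=
  if _h : k + 2 ≤ search.length then
    -- ngram = ' '.join(search_tokens[:n])  (n = k+2 ≥ 0, so the slice is a take)
    if pvJoin (search.take (k + 2)) ∈ token_dict then
      pvLoopA token_dict k
        (saved ++ find_ngrams token_dict next (min (next.length : Int) ((k : Int) + 1))
               ++ [pvJoin (search.take (k + 2))])
        (search.drop (k + 2)) []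
    else
      match search with
      | [] => saved  -- unreachable: search.length ≥ k+2 > 0
      | s :: rest => pvLoopA token_dict k saved rest (next ++ [s])
  else
    saved ++ find_ngrams token_dict (next ++ search)
      (min (((next ++ search).length : Nat) : Int) ((k : Int) + 1))
termination_by (k + 2, search.length)
decreasing_by
  · apply Prod.Lex.left
    have h1 : min ((next.length : Nat) : Int) ((k : Int) + 1) ≤ (k : Int) + 1 := min_le_right _ _
    omega
  · apply Prod.Lex.right'
    · rfl
    · simp; omega
  · apply Prod.Lex.right'
    · rfl
    · simp
  · apply Prod.Lex.left
    have h1 : min (((next ++ search).length : Nat) : Int) ((k : Int) + 1) ≤ (k : Int) + 1 := min_le_right _ _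
    omega
end

-- ===== PORT B =====
-- an item of Source B's work list: (False, t) = uncommitted token, (True, g) = committed ngram
inductive PvItem : Type
  | single : String → PvItem
  | gram : String → PvItem
deriving DecidableEq, Repr

def PvItem.val : PvItem → String
  | .single s => s
  | .gram s => s

def PvItem.isSingle : PvItem → Bool
  | .single _ => true
  | .gram _ => false

-- one inner while-loop of Source B: greedy left-to-right pass at window size k
def pvPass (token_dict : List String) (k : Nat) : List PvItem → List PvItem
  | [] => []
  | x :: xs =>
    if _h : 0 < k ∧ ((x :: xs).take k).length = k ∧ ((x :: xs).take k).all PvItem.isSingle = true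
             ∧ pvJoin (((x :: xs).take k).map PvItem.val) ∈ token_dict then
      PvItem.gram (pvJoin (((x :: xs).take k).map PvItem.val)) :: pvPass token_dict k ((x :: xs).drop k)
    else
      x :: pvPass token_dict k xs
termination_by its => its.length
decreasing_by
  · simp; omega
  · simp

-- Source B's for-loop: k running from its (≥ 2) start value down to 2
def pvLevels (token_dict : List String) : Nat → List PvItem → List PvItem
  | 0, its => its
  | 1, its => its
  | (k+2), its => pvLevels token_dict (k+1) (pvPass token_dict (k+2) its)

def find_ngrams_alt (token_dict : List String) (text : List String) (n : Int) : List String :=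
  if n ≤ 1 then text
  else (pvLevels (PySem.Set.ofList token_dict) (min n ((text.length : Nat) : Int)).toNat
          (text.map PvItem.single)).map PvItem.val

-- ===== PRECONDITION & SPEC =====
def Spec_find_ngrams (token_dict : List String) (text : List String) (n : Int) (out : List String) : Prop := out = find_ngrams_alt token_dict text n
instance (token_dict : List String) (text : List String) (n : Int) (out : List String) : Decidable (Spec_find_ngrams token_dict text n out) := by unfold Spec_find_ngrams; infer_instance

-- ===== CLAIM (what is proved, stated in full; the proofs are below) =====
def Claim_equal_find_ngrams : Prop := ∀ (token_dict : List String) (text : List String) (n : Int), Dom_find_ngrams token_dict text n → Spec_find_ngrams token_dict text n (find_ngrams token_dict text n)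

-- ===== LEMMAS AND PROOFS =====

@[simp] theorem isSingle_single (s : String) : PvItem.isSingle (PvItem.single s) = true := rfl

@[simp] theorem val_single (s : String) : PvItem.val (PvItem.single s) = s := rfl

@[simp] theorem val_gram (s : String) : PvItem.val (PvItem.gram s) = s := rfl

@[simp] theorem map_val_single (xs : List String) : (xs.map PvItem.single).map PvItem.val = xs := by
  induction xs with
  | nil => rfl
  | cons x xs ih => simp [ih]

-- a pass with a window larger than the list is the identity
theorem pass_id (d : List String) (k : Nat) :
    ∀ its : List PvItem, its.length < k → pvPass d k its = its := by
  intro its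
  induction its with
  | nil => intro _; simp [pvPass]
  | cons x xs ih =>
    intro h
    rw [pvPass, dif_neg, ih (by simp at h ⊢; omega)]
    intro hc
    have := hc.2.1
    simp [List.length_take] at this h
    omega

-- committed grams are barriers: a pass distributes over them
@[simp] theorem pass_nil (d : List String) (k : Nat) : pvPass d k [] = [] := by
  simp [pvPass]

theorem pass_split (d : List String) (k : Nat) :
    ∀ (m : Nat) (X : List PvItem) (g : String) (Y : List PvItem), X.length ≤ m →
      pvPass d k (X ++ PvItem.gram g :: Y) = pvPass d k X ++ PvItem.gram g :: pvPass d k Y := by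
  have base : ∀ g Y, pvPass d k (PvItem.gram g :: Y) = PvItem.gram g :: pvPass d k Y := by
    intro g Y
    rw [pvPass, dif_neg]
    intro hc
    obtain ⟨hk, hlen, hall, _⟩ := hc
    have hmem : PvItem.gram g ∈ (PvItem.gram g :: Y).take k := by
      cases k with
      | zero => omega
      | succ k => simp [List.take_succ_cons]
    have := List.all_eq_true.mp hall _ hmem
    simp [PvItem.isSingle] at this
  intro m
  induction m with
  | zero =>
    intro X g Y h
    have : X = [] := List.eq_nil_of_length_eq_zero (by omega)
    subst this
    simpa using base g Y
  | succ m ih =>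
    intro X g Y h
    cases X with
    | nil => simpa using base g Y
    | cons x xs =>
      by_cases hk : k ≤ (x :: xs).length
      · have htake : ((x :: xs) ++ PvItem.gram g :: Y).take k = (x :: xs).take k :=
          List.take_append_of_le_length hk
        have hdrop : ((x :: xs) ++ PvItem.gram g :: Y).drop k = (x :: xs).drop k ++ PvItem.gram g :: Y :=
          List.drop_append_of_le_length hk
        rw [List.cons_append, pvPass, pvPass, ← List.cons_append, htake, hdrop]
        by_cases hc : 0 < k ∧ ((x :: xs).take k).length = k ∧ ((x :: xs).take k).all PvItem.isSingle = true
             ∧ pvJoin (((x :: xs).take k).map PvItem.val) ∈ d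
        · simp only [dif_pos hc]
          have hdl : (List.drop k (x :: xs)).length ≤ m := by
            have hk0 : 0 < k := hc.1
            simp only [List.length_drop, List.length_cons]
            simp only [List.length_cons] at h
            omega
          rw [ih _ _ _ hdl]
          simp
        · simp only [dif_neg hc]
          rw [ih xs g Y (by simp only [List.length_cons] at h; omega)]
          simp
      · -- window does not fit inside X: any full window contains the gram barrier
        have hc2 : ¬(0 < k ∧ ((x :: xs).take k).length = k ∧ ((x :: xs).take k).all PvItem.isSingle = true
             ∧ pvJoin (((x :: xs).take k).map PvItem.val) ∈ d) := by
          intro hc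
          have h2 := hc.2.1
          have h3 : (List.take k (x :: xs)).length ≤ (x :: xs).length :=
            List.length_take_le' k (x :: xs)
          exact hk (by omega)
        have hc1 : ¬(0 < k ∧ ((x :: (xs ++ PvItem.gram g :: Y)).take k).length = k
             ∧ ((x :: (xs ++ PvItem.gram g :: Y)).take k).all PvItem.isSingle = true
             ∧ pvJoin (((x :: (xs ++ PvItem.gram g :: Y)).take k).map PvItem.val) ∈ d) := by
          intro hc
          obtain ⟨hk1, hlen, hall, -⟩ := hc
          have hmem : PvItem.gram g ∈ (x :: (xs ++ PvItem.gram g :: Y)).take k := by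
            have : PvItem.gram g ∈ ((x :: xs) ++ PvItem.gram g :: Y).take k := by
              rw [List.take_append]
              refine List.mem_append_right _ ?_
              cases hx : k - (x :: xs).length with
              | zero => exact absurd (by omega : k ≤ (x :: xs).length) hk
              | succ j => simp [List.take_succ_cons]
            simpa using this
          have := List.all_eq_true.mp hall _ hmem
          simp [PvItem.isSingle] at this
        rw [List.cons_append, pvPass, pvPass, dif_neg hc1, dif_neg hc2,
            ih xs g Y (by simp only [List.length_cons] at h; omega)]
        simp

theorem levels_split (d : List String) :
    ∀ (k : Nat) (X : List PvItem) (g : String) (Y : List PvItem),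
      pvLevels d k (X ++ PvItem.gram g :: Y) = pvLevels d k X ++ PvItem.gram g :: pvLevels d k Y := by
  intro k
  induction k using Nat.strong_induction_on with
  | _ k ih =>
    match k with
    | 0 => intro X g Y; simp [pvLevels]
    | 1 => intro X g Y; simp [pvLevels]
    | (k+2) =>
      intro X g Y
      simp only [pvLevels]
      rw [pass_split d (k+2) X.length X g Y le_rfl, ih (k+1) (by omega)]

-- levels above the list length do nothing
theorem levels_ge (d : List String) :
    ∀ (k : Nat) (its : List PvItem), its.length ≤ k → pvLevels d k its = pvLevels d its.length its := by
  intro k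
  induction k using Nat.strong_induction_on with
  | _ k ih =>
    match k with
    | 0 =>
      intro its h
      have : its.length = 0 := by omega
      rw [this]
    | 1 =>
      intro its h
      have h01 : its.length = 0 ∨ its.length = 1 := by omega
      rcases h01 with h0 | h0 <;> rw [h0]
      rfl
    | (k+2) =>
      intro its h
      by_cases he : its.length = k + 2
      · rw [he]
      · rw [pvLevels, pass_id d (k+2) its (by omega), ih (k+1) (by omega) its (by omega)]

-- pvPass at level k+2 on an all-token list: the two branch shapes of A's loop body
theorem all_single_take (xs : List String) (k : Nat) :
    ((xs.map PvItem.single).take k).all PvItem.isSingle = true := by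
  rw [List.all_eq_true]
  intro x hx
  obtain ⟨s, -, rfl⟩ := List.mem_map.mp (List.mem_of_mem_take hx)
  rfl

theorem pass_match (d : List String) (k : Nat) (search : List String)
    (hlen : k + 2 ≤ search.length) (hg : pvJoin (search.take (k + 2)) ∈ d) :
    pvPass d (k+2) (search.map PvItem.single) =
      PvItem.gram (pvJoin (search.take (k + 2))) ::
        pvPass d (k+2) ((search.drop (k + 2)).map PvItem.single) := by
  match search with
  | [] => simp at hlen
  | s :: rest =>
    have hcond : 0 < k+2 ∧ (((s :: rest).map PvItem.single).take (k+2)).length = k+2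
        ∧ (((s :: rest).map PvItem.single).take (k+2)).all PvItem.isSingle = true
        ∧ pvJoin ((((s :: rest).map PvItem.single).take (k+2)).map PvItem.val) ∈ d := by
      refine ⟨by omega, by simp at hlen ⊢; omega, all_single_take _ _, ?_⟩
      rw [← List.map_take, map_val_single]
      exact hg
    rw [List.map_cons] at hcond
    rw [List.map_cons, pvPass, dif_pos hcond, ← List.map_cons, ← List.map_take, ← List.map_drop,
        map_val_single]

theorem pass_nomatch (d : List String) (k : Nat) (s : String) (rest : List String)
    (hg : pvJoin ((s :: rest).take (k + 2)) ∉ d) :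
    pvPass d (k+2) ((s :: rest).map PvItem.single) =
      PvItem.single s :: pvPass d (k+2) (rest.map PvItem.single) := by
  rw [List.map_cons, pvPass, dif_neg]
  intro hc
  rw [← List.map_cons, ← List.map_take, map_val_single] at hc
  exact hg hc.2.2.2

-- A's recursion on an unmatched remainder R (called at level min(len(R), n-1))
-- equals B's remaining levels k+1 .. 2 applied to R's tokens
theorem find_min (d : List String) (k : Nat)
    (IH : ∀ (n' : Int) (text : List String), n'.toNat < k + 2 →
      find_ngrams d text n' = (pvLevels (PySem.Set.ofList d) n'.toNat (text.map PvItem.single)).map PvItem.val)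
    (R : List String) :
    find_ngrams d R (min ((R.length : Nat) : Int) ((k : Int) + 1)) =
      (pvLevels (PySem.Set.ofList d) (k+1) (R.map PvItem.single)).map PvItem.val := by
  have h1 : (min ((R.length : Nat) : Int) ((k : Int) + 1)).toNat = min R.length (k+1) := by
    rcases le_total ((R.length : Nat) : Int) ((k : Int) + 1) with h | h
    · rw [min_eq_left h]; omega
    · rw [min_eq_right h]; omega
  rw [IH _ R (by omega), h1]
  rcases le_total R.length (k+1) with h | h
  · rw [min_eq_left h, levels_ge (PySem.Set.ofList d) (k+1) (R.map PvItem.single) (by simpa using h), List.length_map]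
  · rw [min_eq_right h]

theorem loop_char (d : List String) (k : Nat)
    (IH : ∀ (n' : Int) (text : List String), n'.toNat < k + 2 →
      find_ngrams d text n' = (pvLevels (PySem.Set.ofList d) n'.toNat (text.map PvItem.single)).map PvItem.val) :
    ∀ (m : Nat) (search next saved : List String), search.length ≤ m →
      pvLoopA d k saved search next =
        saved ++ (pvLevels (PySem.Set.ofList d) (k+1)
          (next.map PvItem.single ++ pvPass (PySem.Set.ofList d) (k+2) (search.map PvItem.single))).map PvItem.val := by
  intro m
  induction m with
  | zero =>
    intro search next saved h
    have : search = [] := List.eq_nil_of_length_eq_zero (by omega)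
    subst this
    rw [pvLoopA, dif_neg (by simp)]
    show saved ++ find_ngrams d (next ++ []) _ = _
    rw [find_min d k IH (next ++ [])]
    simp
  | succ m ih =>
    intro search next saved h
    rw [pvLoopA]
    by_cases hlen : k + 2 ≤ search.length
    · rw [dif_pos hlen]
      by_cases hg : pvJoin (search.take (k + 2)) ∈ d
      · rw [if_pos hg, ih (search.drop (k+2)) [] _ (by simp; omega)]
        rw [pass_match (PySem.Set.ofList d) k search hlen (by rw [PySem.Set.mem_ofList]; exact hg), levels_split (PySem.Set.ofList d) (k+1)]
        rw [find_min d k IH next]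
        simp [List.map_append]
      · rw [if_neg hg]
        match search, hlen with
        | s :: rest, _ =>
          show pvLoopA d k saved rest (next ++ [s]) = _
          rw [ih rest (next ++ [s]) saved (by simp only [List.length_cons] at h; omega)]
          rw [pass_nomatch (PySem.Set.ofList d) k s rest (by rw [PySem.Set.mem_ofList]; exact hg)]
          simp [List.map_append]
    · rw [dif_neg hlen]
      rw [pass_id (PySem.Set.ofList d) (k+2) (search.map PvItem.single) (by simp; omega)]
      rw [find_min d k IH (next ++ search)]
      rw [List.map_append]

theorem find_char (d : List String) :
    ∀ (N : Nat) (n : Int) (text : List String), n.toNat ≤ N →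
      find_ngrams d text n = (pvLevels (PySem.Set.ofList d) n.toNat (text.map PvItem.single)).map PvItem.val := by
  intro N
  induction N with
  | zero =>
    intro n text h
    have h1 : n ≤ 1 := by omega
    have h0 : n.toNat = 0 := by omega
    rw [find_ngrams, if_pos h1, h0]
    rw [show pvLevels (PySem.Set.ofList d) 0 (text.map PvItem.single) = text.map PvItem.single from rfl, map_val_single]
  | succ N ihN =>
    intro n text h
    by_cases h1 : n ≤ 1
    · rw [find_ngrams, if_pos h1]
      have h0 : n.toNat = 0 ∨ n.toNat = 1 := by omega
      rcases h0 with h0 | h0 <;> rw [h0]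
      · rw [show pvLevels (PySem.Set.ofList d) 0 (text.map PvItem.single) = text.map PvItem.single from rfl, map_val_single]
      · rw [show pvLevels (PySem.Set.ofList d) 1 (text.map PvItem.single) = text.map PvItem.single from rfl, map_val_single]
    · rw [find_ngrams, if_neg h1]
      have hk : n.toNat - 2 + 2 = n.toNat := by omega
      rw [loop_char d (n.toNat - 2)
            (fun n' t' hlt => ihN n' t' (by omega)) text.length text [] [] le_rfl]
      conv_rhs => rw [← hk]
      simp [pvLevels]

-- ===== VERDICT (by name: the statement is the Claim_ definition above) =====
theorem find_ngrams_spec : Claim_equal_find_ngrams := by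
  intro d text n _
  unfold Spec_find_ngrams find_ngrams_alt
  by_cases h1 : n ≤ 1
  · rw [if_pos h1, find_ngrams, if_pos h1]
  · rw [if_neg h1, find_char d n.toNat n text le_rfl]
    congr 1
    rcases le_total ((text.length : Nat) : Int) n with h | h
    · rw [min_eq_right h]
      rw [levels_ge (PySem.Set.ofList d) n.toNat (text.map PvItem.single) (by simp only [List.length_map]; omega)]
      rw [show ((text.length : Nat) : Int).toNat = text.length from by omega]
      congr 1
      simp
    · rw [min_eq_left h]
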